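-- pv_equiv track=rewrite | github.com/surcyf123/pretraining-frontend | amplify/backend/function/wandb/src/utils/script.py | group_run_ids
-- ===== SOURCE A (Python) =====
-- def group_run_ids(data):
--     grouped_run_ids = {}
--
--     if isinstance(data, dict):
--         for run_id in data.keys():
--             if isinstance(run_id, str):
--                 validator_number = run_id.split("-")[1]
--                 grouped_run_ids.setdefault(validator_number, []).append(run_id)
--     return grouped_run_ids
-- ===== SOURCE B (Python) =====
-- def group_run_ids(data):
--     if not isinstance(data, dict):
--         return {}
--     keys = [k for k in data.keys() if isinstance(k, str)]
--     labels = list(dict.fromkeys(k.split("-")[1] for k in keys))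
--     return {v: [k for k in keys if k.split("-")[1] == v] for v in labels}
-- ===== Notes on version B (the rewrite author's own statement) =====
-- stated objective: alternative
-- what changed: Replaces the single-pass setdefault/append accumulation into a mutable dict by a two-phase plan: ordered dedup of the hyphen-split labels, then one dict comprehension that builds each group by filtering the key list per label.
import Mathlib
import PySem

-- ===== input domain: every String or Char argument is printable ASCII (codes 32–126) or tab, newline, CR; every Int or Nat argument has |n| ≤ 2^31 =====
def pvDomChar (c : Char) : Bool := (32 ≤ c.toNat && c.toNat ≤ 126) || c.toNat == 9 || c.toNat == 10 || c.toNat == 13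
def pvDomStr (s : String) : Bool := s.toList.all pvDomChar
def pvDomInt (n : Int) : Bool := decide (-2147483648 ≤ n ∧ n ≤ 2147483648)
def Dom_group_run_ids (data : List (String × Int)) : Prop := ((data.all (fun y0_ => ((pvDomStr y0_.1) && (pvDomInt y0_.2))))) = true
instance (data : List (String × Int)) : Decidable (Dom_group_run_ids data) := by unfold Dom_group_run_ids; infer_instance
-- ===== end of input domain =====

-- ===== PORT A =====
-- B differs from A by a different decomposition (ordered label dedup + per-label filter
-- instead of one setdefault/append accumulation pass); objective: alternative.
-- run_id.split("-")[1]; total via getD "" — Pre_ excludes keys without "-", where Python raises IndexError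
def pvLabel (run_id : String) : String :=
  (PySem.List.pyGet? ((PySem.Str.split? run_id "-").getD []) 1).getD ""

def group_run_ids (data : List (String × Int)) : List (String × List String) :=
  -- for run_id in data.keys(): grouped.setdefault(label, []).append(run_id)
  -- (isinstance checks are vacuous under the type convention: data is a dict of str keys)
  ((PySem.Dict.ofList data).keys.foldl
    (fun g run_id => g.modify (pvLabel run_id) [] (· ++ [run_id]))
    PySem.Dict.empty).items

-- ===== PORT B =====
def group_run_ids_alt (data : List (String × Int)) : List (String × List String) :=
  let keys := (PySem.Dict.ofList data).keys
  let labels := PySem.List.dedup (keys.map pvLabel)   -- list(dict.fromkeys(...))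
  labels.map (fun v => (v, keys.filter (fun k => pvLabel k == v)))

-- ===== PRECONDITION & SPEC =====
-- Pre_ excludes inputs with a key containing no "-": there Python A (and B) raise IndexError.
def Pre_group_run_ids (data : List (String × Int)) : Prop :=
  ∀ p ∈ data, '-' ∈ p.1.toList
instance (data : List (String × Int)) : Decidable (Pre_group_run_ids data) := by
  unfold Pre_group_run_ids; infer_instance

def pvWitness_group_run_ids : (List (String × Int)) :=
  [("run-3-a", 1), ("run-5-b", 2), ("x-3", 0)]

def Spec_group_run_ids (data : List (String × Int)) (out : List (String × List String)) : Prop := out = group_run_ids_alt data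
instance (data : List (String × Int)) (out : List (String × List String)) : Decidable (Spec_group_run_ids data out) := by unfold Spec_group_run_ids; infer_instance

-- ===== CLAIM (what is proved, stated in full; the proofs are below) =====
def Claim_equal_group_run_ids : Prop := ∀ (data : List (String × Int)), Dom_group_run_ids data → Pre_group_run_ids data → Spec_group_run_ids data (group_run_ids data)

-- ===== LEMMAS AND PROOFS =====

-- A's loop over keys, seen as a loop over (label, key) pairs, so the PySem grouping lemmas apply
theorem groupA_eq_pairs (ks : List String) :
    ks.foldl (fun g run_id => g.modify (pvLabel run_id) [] (· ++ [run_id]))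
      (PySem.Dict.empty : PySem.Dict String (List String))
    = (ks.map (fun k => (pvLabel k, k))).foldl
        (fun g p => g.modify p.1 [] (· ++ [p.2])) PySem.Dict.empty := by
  rw [List.foldl_map]

theorem getD_groupA (ks : List String) (v : String) :
    ((ks.foldl (fun g run_id => g.modify (pvLabel run_id) [] (· ++ [run_id]))
      (PySem.Dict.empty : PySem.Dict String (List String))).getD v [])
    = ks.filter (fun k => pvLabel k == v) := by
  rw [groupA_eq_pairs, PySem.Dict.getD_foldl_modify_append, List.filter_map]
  simp [Function.comp_def]

theorem keys_groupA (ks : List String) :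
    (ks.foldl (fun g run_id => g.modify (pvLabel run_id) [] (· ++ [run_id]))
      (PySem.Dict.empty : PySem.Dict String (List String))).keys
    = PySem.List.dedup (ks.map pvLabel) := by
  rw [PySem.Dict.keys_foldl_modify_key]
  simp [PySem.Dict.keys, PySem.Dict.empty, PySem.List.dedup_eq_ofList, PySem.Set.update]
  rfl

theorem nodup_keys_groupA (ks : List String) :
    (ks.foldl (fun g run_id => g.modify (pvLabel run_id) [] (· ++ [run_id]))
      (PySem.Dict.empty : PySem.Dict String (List String))).keys.Nodup := by
  apply PySem.Dict.nodup_keys_foldl_modify_key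
  simp [PySem.Dict.keys, PySem.Dict.empty]

-- ===== VERDICT (by name: the statement is the Claim_ definition above) =====
theorem group_run_ids_spec : Claim_equal_group_run_ids := by
  intro data _ _
  unfold Spec_group_run_ids group_run_ids group_run_ids_alt
  rw [PySem.Dict.items_eq_map_keys _ (nodup_keys_groupA _) ([] : List String)]
  rw [keys_groupA]
  apply List.map_congr_left
  intro v _
  rw [getD_groupA]
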